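-- pv_equiv track=rewrite | github.com/FujikawaYouta/LeetCode | 2101.引爆最多的炸弹.py | maximumDetonation
-- ===== SOURCE A (Python) =====
-- def maximumDetonation(bombs: list[list[int]]) -> int:
--     n = len(bombs)
--     neighbor_table = []
--     # 建立邻接表，对于每一个结点遍历他的邻居
--     def calSquaredDistance(bomb1, bomb2):
--         return (bomb1[0]-bomb2[0])**2+(bomb1[1]-bomb2[1])**2
--     for i in range(n):
--         cur_neighbor = []
--         for j in range(n):
--             if i==j:
--                 continue
--             # i-->j是可达的
--             if calSquaredDistance(bombs[i], bombs[j])<=bombs[i][2]**2: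
--                 cur_neighbor.append(j)
--         neighbor_table.append(cur_neighbor)
--     # 建立好邻接表后开始遍历结点
--     max_count = 1
--     for i, bomb in enumerate(bombs):
--         # 初始化访问结点为自己
--         visited = {i}
--         cur_queue = [i]
--         # 广度优先搜索
--         while len(cur_queue)!=0:
--             cur_node = cur_queue.pop(0)
--             for node in neighbor_table[cur_node]:
--                 if node not in visited:
--                     cur_queue.append(node)
--                     visited.add(node)
--         max_count = max(max_count, len(visited))
--     return max_count
-- ===== SOURCE B (Python) =====
-- def maximumDetonation(bombs: list[list[int]]) -> int:
--     # Same result, no precomputed adjacency table: BFS from each start bomb,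
--     # scanning the bomb list on demand from the currently popped bomb.
--     n = len(bombs)
--     best = 1
--     for i in range(n):
--         visited = {i}
--         queue = [i]
--         while queue:
--             cur = queue.pop(0)
--             x, y, r = bombs[cur][0], bombs[cur][1], bombs[cur][2]
--             for j in range(n):
--                 if j != cur and j not in visited:
--                     dx = bombs[j][0] - x
--                     dy = bombs[j][1] - y
--                     if dx * dx + dy * dy <= r * r:
--                         visited.add(j)
--                         queue.append(j)
--         best = max(best, len(visited))
--     return best
-- ===== Notes on version B (the rewrite author's own statement) =====
-- stated objective: simpler
-- what changed: Drops A's precomputed neighbor-adjacency table entirely: B runs the BFS directly, scanning the bomb list on demand from each popped bomb (squared distances, current bomb's radius), so the whole index-building pass disappears.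
-- outside the precondition, e.g. on maximumDetonation([[]]): A returns 1, B raises IndexError; on maximumDetonation([[0, 0]]): A returns 1, B raises IndexError
import Mathlib
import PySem

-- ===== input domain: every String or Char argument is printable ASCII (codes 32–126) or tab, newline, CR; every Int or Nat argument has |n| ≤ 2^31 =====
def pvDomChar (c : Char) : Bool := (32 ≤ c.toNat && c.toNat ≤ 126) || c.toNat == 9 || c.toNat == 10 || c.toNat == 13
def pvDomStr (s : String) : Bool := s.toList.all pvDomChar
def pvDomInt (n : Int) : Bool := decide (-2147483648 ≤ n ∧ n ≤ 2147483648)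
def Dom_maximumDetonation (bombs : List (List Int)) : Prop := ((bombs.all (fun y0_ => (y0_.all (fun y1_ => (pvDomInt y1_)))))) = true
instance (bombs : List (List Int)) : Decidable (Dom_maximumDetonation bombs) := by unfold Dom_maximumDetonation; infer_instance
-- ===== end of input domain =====

-- B drops A's precomputed adjacency table and instead scans the bomb list on demand
-- during each BFS (objective: simpler — no index-building pass).


-- ===== PORT A =====
-- calSquaredDistance(bomb1, bomb2); pyGetD is exact under Pre_ (every bomb has ≥ 3 entries)
def pvSqdA (b1 b2 : List Int) : Int :=
  (PySem.List.pyGetD b1 0 0 - PySem.List.pyGetD b2 0 0) ^ 2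
    + (PySem.List.pyGetD b1 1 0 - PySem.List.pyGetD b2 1 0) ^ 2

-- inner loop of the table build: cur_neighbor for a fixed i
def pvNbrRow (bombs : List (List Int)) (n i : Int) : List Int :=
  (PySem.List.pyRange 0 n 1).foldl
    (fun cur j =>
      if i = j then cur
      else if pvSqdA (PySem.List.pyGetD bombs i []) (PySem.List.pyGetD bombs j [])
                ≤ (PySem.List.pyGetD (PySem.List.pyGetD bombs i []) 2 0) ^ 2
        then cur ++ [j] else cur)
    []

-- neighbor_table
def pvTable (bombs : List (List Int)) (n : Int) : List (List Int) :=
  (PySem.List.pyRange 0 n 1).foldl (fun tbl i => tbl ++ [pvNbrRow bombs n i]) []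

-- the while-loop over (visited, cur_queue); fuel bombs.length + 1 bounds the pops
-- (each bomb is enqueued at most once), so the recursion mirrors Python's loop exactly
def pvBfsA (tbl : List (List Int)) : Nat → PySem.Set Int → List Int → PySem.Set Int
  | 0, visited, _ => visited
  | _ + 1, visited, [] => visited
  | f + 1, visited, cur :: rest =>
    let st := (PySem.List.pyGetD tbl cur []).foldl
      (fun (p : PySem.Set Int × List Int) node =>
        if node ∈ p.1 then p else (PySem.Set.add p.1 node, p.2 ++ [node]))
      (visited, rest)
    pvBfsA tbl f st.1 st.2

def maximumDetonation (bombs : List (List Int)) : Int :=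
  let n : Int := bombs.length
  let tbl := pvTable bombs n
  (PySem.List.enumerate bombs 0).foldl
    (fun maxCount p =>
      max maxCount (PySem.Set.len (pvBfsA tbl (bombs.length + 1) (PySem.Set.ofList [p.1]) [p.1])))
    1

-- ===== PORT B =====
-- BFS step of Source B: pop cur, scan ALL bombs j on demand with cur's own radius
def pvBfsB (bombs : List (List Int)) (n : Int) : Nat → PySem.Set Int → List Int → PySem.Set Int
  | 0, visited, _ => visited
  | _ + 1, visited, [] => visited
  | f + 1, visited, cur :: rest =>
    let b := PySem.List.pyGetD bombs cur []
    let x := PySem.List.pyGetD b 0 0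
    let y := PySem.List.pyGetD b 1 0
    let r := PySem.List.pyGetD b 2 0
    let st := (PySem.List.pyRange 0 n 1).foldl
      (fun (p : PySem.Set Int × List Int) j =>
        if j ≠ cur ∧ j ∉ p.1 then
          let bj := PySem.List.pyGetD bombs j []
          let dx := PySem.List.pyGetD bj 0 0 - x
          let dy := PySem.List.pyGetD bj 1 0 - y
          if dx * dx + dy * dy ≤ r * r then (PySem.Set.add p.1 j, p.2 ++ [j]) else p
        else p)
      (visited, rest)
    pvBfsB bombs n f st.1 st.2

def maximumDetonation_alt (bombs : List (List Int)) : Int :=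
  let n : Int := bombs.length
  (PySem.List.pyRange 0 n 1).foldl
    (fun best i =>
      max best (PySem.Set.len (pvBfsB bombs n (bombs.length + 1) (PySem.Set.ofList [i]) [i])))
    1

-- ===== PRECONDITION & SPEC =====
-- Pre_ excludes the inputs with a bomb of fewer than 3 coordinates: there Python A raises
-- IndexError (it reads bombs[i][0..2] for every pair i != j), except in the accidental
-- single-malformed-bomb case, where A's pair loops never index the bomb and it returns 1
-- while B (which reads the popped bomb's coordinates) raises IndexError.
def Pre_maximumDetonation (bombs : List (List Int)) : Prop := ∀ b ∈ bombs, 3 ≤ b.length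
instance (bombs : List (List Int)) : Decidable (Pre_maximumDetonation bombs) := by unfold Pre_maximumDetonation; infer_instance
def pvWitness_maximumDetonation : List (List Int) := [[0, 0, 2], [2, 0, 1], [5, 0, 1]]

def Spec_maximumDetonation (bombs : List (List Int)) (out : Int) : Prop := out = maximumDetonation_alt bombs
instance (bombs : List (List Int)) (out : Int) : Decidable (Spec_maximumDetonation bombs out) := by unfold Spec_maximumDetonation; infer_instance

-- ===== CLAIM (what is proved, stated in full; the proofs are below) =====
def Claim_equal_maximumDetonation : Prop := ∀ (bombs : List (List Int)), Dom_maximumDetonation bombs → Pre_maximumDetonation bombs → Spec_maximumDetonation bombs (maximumDetonation bombs)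

-- ===== LEMMAS AND PROOFS =====
-- A's neighbor row is a filter of range(n)
lemma pvNbrRow_eq_filter (bombs : List (List Int)) (n i : Int) :
    pvNbrRow bombs n i = (PySem.List.pyRange 0 n 1).filter
      (fun j => decide (¬ i = j ∧
        pvSqdA (PySem.List.pyGetD bombs i []) (PySem.List.pyGetD bombs j [])
          ≤ (PySem.List.pyGetD (PySem.List.pyGetD bombs i []) 2 0) ^ 2)) := by
  unfold pvNbrRow
  have hfun : (fun (cur : List Int) (j : Int) =>
      if i = j then cur
      else if pvSqdA (PySem.List.pyGetD bombs i []) (PySem.List.pyGetD bombs j [])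
                ≤ (PySem.List.pyGetD (PySem.List.pyGetD bombs i []) 2 0) ^ 2
        then cur ++ [j] else cur)
      = (fun (cur : List Int) (j : Int) =>
        if (¬ i = j ∧ pvSqdA (PySem.List.pyGetD bombs i []) (PySem.List.pyGetD bombs j [])
              ≤ (PySem.List.pyGetD (PySem.List.pyGetD bombs i []) 2 0) ^ 2)
          then cur ++ [j] else cur) := by
    funext cur j
    by_cases h1 : i = j <;> by_cases h2 : pvSqdA (PySem.List.pyGetD bombs i []) (PySem.List.pyGetD bombs j [])
        ≤ (PySem.List.pyGetD (PySem.List.pyGetD bombs i []) 2 0) ^ 2 <;> simp [h1, h2]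
  rw [hfun, PySem.List.foldl_append_ite_eq_filter]
  simp

-- indexing the built table at a valid index yields that row
lemma pvTable_get (bombs : List (List Int)) (i : Int) (h0 : 0 ≤ i) (h1 : i < (bombs.length : Int)) :
    PySem.List.pyGetD (pvTable bombs bombs.length) i []
      = pvNbrRow bombs bombs.length i := by
  unfold pvTable
  rw [PySem.List.foldl_append_singleton_eq_map (fun i => pvNbrRow bombs bombs.length i)]
  simpa using PySem.List.pyGetD_map_pyRange_of_nonneg
    (fun i => pvNbrRow bombs bombs.length i) (bombs.length : Int) i [] h0 h1

-- one BFS step: A's walk of its precomputed row = B's on-demand scan of range(n)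
lemma pvStep (bombs : List (List Int)) (cur : Int)
    (h0 : 0 ≤ cur) (h1 : cur < (bombs.length : Int)) (p0 : PySem.Set Int × List Int) :
    (PySem.List.pyGetD (pvTable bombs bombs.length) cur []).foldl
      (fun (p : PySem.Set Int × List Int) node =>
        if node ∈ p.1 then p else (PySem.Set.add p.1 node, p.2 ++ [node])) p0
    = (PySem.List.pyRange 0 (bombs.length : Int) 1).foldl
      (fun (p : PySem.Set Int × List Int) j =>
        if j ≠ cur ∧ j ∉ p.1 then
          if (PySem.List.pyGetD (PySem.List.pyGetD bombs j []) 0 0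
                - PySem.List.pyGetD (PySem.List.pyGetD bombs cur []) 0 0)
              * (PySem.List.pyGetD (PySem.List.pyGetD bombs j []) 0 0
                - PySem.List.pyGetD (PySem.List.pyGetD bombs cur []) 0 0)
              + (PySem.List.pyGetD (PySem.List.pyGetD bombs j []) 1 0
                - PySem.List.pyGetD (PySem.List.pyGetD bombs cur []) 1 0)
              * (PySem.List.pyGetD (PySem.List.pyGetD bombs j []) 1 0
                - PySem.List.pyGetD (PySem.List.pyGetD bombs cur []) 1 0)
              ≤ PySem.List.pyGetD (PySem.List.pyGetD bombs cur []) 2 0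
                * PySem.List.pyGetD (PySem.List.pyGetD bombs cur []) 2 0
          then (PySem.Set.add p.1 j, p.2 ++ [j]) else p
        else p) p0 := by
  rw [pvTable_get bombs cur h0 h1, pvNbrRow_eq_filter, List.foldl_filter]
  apply PySem.List.foldl_congr_mem
  intro p j hj
  have hiff : pvSqdA (PySem.List.pyGetD bombs cur []) (PySem.List.pyGetD bombs j [])
        ≤ (PySem.List.pyGetD (PySem.List.pyGetD bombs cur []) 2 0) ^ 2
      ↔ (PySem.List.pyGetD (PySem.List.pyGetD bombs j []) 0 0
            - PySem.List.pyGetD (PySem.List.pyGetD bombs cur []) 0 0)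
          * (PySem.List.pyGetD (PySem.List.pyGetD bombs j []) 0 0
            - PySem.List.pyGetD (PySem.List.pyGetD bombs cur []) 0 0)
          + (PySem.List.pyGetD (PySem.List.pyGetD bombs j []) 1 0
            - PySem.List.pyGetD (PySem.List.pyGetD bombs cur []) 1 0)
          * (PySem.List.pyGetD (PySem.List.pyGetD bombs j []) 1 0
            - PySem.List.pyGetD (PySem.List.pyGetD bombs cur []) 1 0)
          ≤ PySem.List.pyGetD (PySem.List.pyGetD bombs cur []) 2 0
            * PySem.List.pyGetD (PySem.List.pyGetD bombs cur []) 2 0 := by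
    unfold pvSqdA
    constructor <;> intro h <;> nlinarith [h]
  by_cases hne : cur = j
  · simp [hne]
  · by_cases hm : j ∈ p.1
    · simp [hne, hm, Ne.symm hne]
    · by_cases hd : pvSqdA (PySem.List.pyGetD bombs cur []) (PySem.List.pyGetD bombs j [])
          ≤ (PySem.List.pyGetD (PySem.List.pyGetD bombs cur []) 2 0) ^ 2
      · simp [hne, hm, hd, Ne.symm hne, ← hiff]
      · simp [hne, hm, hd, Ne.symm hne, ← hiff]

-- every element of the queue after B's scan was already queued or comes from the scanned list
lemma pvFold_snd_sub (g : PySem.Set Int × List Int → Int → PySem.Set Int × List Int)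
    (hg : ∀ p j, (g p j).2 = p.2 ∨ (g p j).2 = p.2 ++ [j])
    (l : List Int) : ∀ (p0 : PySem.Set Int × List Int) (x : Int),
      x ∈ (l.foldl g p0).2 → x ∈ p0.2 ∨ x ∈ l := by
  induction l with
  | nil => intro p0 x hx; exact Or.inl hx
  | cons a t ih =>
    intro p0 x hx
    rcases ih (g p0 a) x hx with h | h
    · rcases hg p0 a with he | he
      · rw [he] at h; exact Or.inl h
      · rw [he] at h
        rcases List.mem_append.mp h with h | h
        · exact Or.inl h
        · simp at h; simp [h]
    · simp [h]

-- the two BFS loops run in lockstep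
lemma pvBfs_eq (bombs : List (List Int)) : ∀ (f : Nat) (v : PySem.Set Int) (q : List Int),
    (∀ x ∈ q, 0 ≤ x ∧ x < (bombs.length : Int)) →
    pvBfsA (pvTable bombs bombs.length) f v q = pvBfsB bombs bombs.length f v q := by
  intro f
  induction f with
  | zero => intro v q _; rfl
  | succ f ih =>
    intro v q hq
    cases q with
    | nil => rfl
    | cons cur rest =>
      obtain ⟨hc0, hc1⟩ := hq cur (by simp)
      simp only [pvBfsA, pvBfsB]
      rw [pvStep bombs cur hc0 hc1]
      apply ih
      intro x hx
      rcases pvFold_snd_sub _ (by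
          intro p j
          split_ifs <;> simp) _ _ x hx with h | h
      · exact hq x (List.mem_cons_of_mem _ h)
      · exact PySem.List.mem_pyRange_one.mp h


theorem maximumDetonation_spec : Claim_equal_maximumDetonation := by
  intro bombs _ _
  unfold Spec_maximumDetonation maximumDetonation maximumDetonation_alt
  rw [PySem.List.enumerate_eq_map_pyRange bombs [], List.foldl_map]
  simp only [PySem.List.len_eq]
  apply PySem.List.foldl_congr_mem
  intro acc i hi
  obtain ⟨hi0, hi1⟩ := PySem.List.mem_pyRange_one.mp hi
  rw [pvBfs_eq bombs _ _ _ (by intro x hx; simp at hx; subst hx; exact ⟨hi0, hi1⟩)]
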